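-- pv_equiv track=rewrite | github.com/sagerpascal/lateral-connections | src/main_evaluation.py | get_datapoints
-- ===== SOURCE A (Python) =====
-- from typing import Any, Dict, List, Optional, Tuple
--
-- def get_datapoints(n_points) -> List[Tuple[Tuple[int, int], Tuple[int, int]]]:
--     def rotate_point_square(p: Tuple[int, int]) -> Tuple[int, int]:
--         """
--         Rotates a point ccw along a square trajectory -> required for straight line dataset
--         :param p: Current position
--         :return: Next position
--         """
--         (x, y) = p
--         if x == 2:
--             if y < 30:
--                 y += 1
--             else:
--                 x += 1
--         elif x < 30:
--             if y == 2:
--                 x -= 1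
--             else:
--                 x += 1
--         else:
--             if y > 2:
--                 y -= 1
--             else:
--                 x -= 1
--         return (x, y)
--
--     p1 = (2, 16)
--     p2 = (30, 16)
--     points = [(p1, p2)]
--
--     for idx in range(n_points - 1):
--         p1 = rotate_point_square(p1)
--         p2 = rotate_point_square(p2)
--         points.append((p1, p2))
--     return points
-- ===== SOURCE B (Python) =====
-- from typing import List, Tuple
--
-- def get_datapoints(n_points) -> List[Tuple[Tuple[int, int], Tuple[int, int]]]:
--     def pos(i: int) -> Tuple[int, int]:
--         j = (i + 14) % 112
--         if j <= 28:
--             return (2, 2 + j)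
--         if j <= 56:
--             return (j - 26, 30)
--         if j <= 84:
--             return (30, 86 - j)
--         return (114 - j, 2)
--
--     return [(pos(i), pos(i + 56)) for i in range(max(1, n_points))]
-- ===== Notes on version B (the rewrite author's own statement) =====
-- stated objective: alternative
-- what changed: Replaces the stateful square-walk (iterating a rotate state machine for both points) with a closed-form function mapping each step index directly to its position on the perimeter cycle, the second point leading the first by half a cycle.
import Mathlib
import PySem

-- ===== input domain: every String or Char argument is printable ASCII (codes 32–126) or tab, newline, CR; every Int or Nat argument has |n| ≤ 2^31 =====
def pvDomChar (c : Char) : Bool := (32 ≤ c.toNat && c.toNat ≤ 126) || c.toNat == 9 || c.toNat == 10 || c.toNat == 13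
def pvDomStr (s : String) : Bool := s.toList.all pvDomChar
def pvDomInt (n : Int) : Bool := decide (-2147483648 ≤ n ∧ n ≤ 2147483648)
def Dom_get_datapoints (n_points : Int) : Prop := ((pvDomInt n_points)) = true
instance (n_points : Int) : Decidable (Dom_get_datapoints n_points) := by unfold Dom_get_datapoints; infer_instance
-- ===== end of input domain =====

-- B replaces A's stateful square-walk state machine by a closed-form position function on the perimeter cycle (alternative decomposition, same cost).

-- ===== PORT A =====
def rotate_point_square (p : Int × Int) : Int × Int :=
  let (x, y) := p
  if x = 2 then
    if y < 30 then (x, y + 1) else (x + 1, y)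
  else if x < 30 then
    if y = 2 then (x - 1, y) else (x + 1, y)
  else
    if y > 2 then (x, y - 1) else (x - 1, y)

def get_datapoints (n_points : Int) : List ((Int × Int) × (Int × Int)) :=
  let p1 : Int × Int := (2, 16)
  let p2 : Int × Int := (30, 16)
  let points : List ((Int × Int) × (Int × Int)) := [(p1, p2)]
  let st := (PySem.List.pyRange 0 (n_points - 1) 1).foldl
    (fun (st : (Int × Int) × (Int × Int) × List ((Int × Int) × (Int × Int))) _ =>
      let p1 := rotate_point_square st.1
      let p2 := rotate_point_square st.2.1
      (p1, p2, st.2.2 ++ [(p1, p2)]))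
    (p1, p2, points)
  st.2.2

-- ===== PORT B =====
def pv_pos (i : Int) : Int × Int :=
  let j := PySem.Int.mod (i + 14) 112
  if j ≤ 28 then (2, 2 + j)
  else if j ≤ 56 then (j - 26, 30)
  else if j ≤ 84 then (30, 86 - j)
  else (114 - j, 2)

def get_datapoints_alt (n_points : Int) : List ((Int × Int) × (Int × Int)) :=
  (PySem.List.pyRange 0 (max 1 n_points) 1).map (fun i => (pv_pos i, pv_pos (i + 56)))

-- ===== PRECONDITION & SPEC =====
def Spec_get_datapoints (n_points : Int) (out : List ((Int × Int) × (Int × Int))) : Prop := out = get_datapoints_alt n_points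
instance (n_points : Int) (out : List ((Int × Int) × (Int × Int))) : Decidable (Spec_get_datapoints n_points out) := by unfold Spec_get_datapoints; infer_instance

-- ===== CLAIM (what is proved, stated in full; the proofs are below) =====
def Claim_equal_get_datapoints : Prop := ∀ (n_points : Int), Dom_get_datapoints n_points → Spec_get_datapoints n_points (get_datapoints n_points)

-- ===== LEMMAS AND PROOFS =====

-- closed-form position on the cycle, indexed by a Nat step count
def posJ (j : Nat) : Int × Int :=
  if j ≤ 28 then (2, 2 + (j : Int))
  else if j ≤ 56 then ((j : Int) - 26, 30)
  else if j ≤ 84 then (30, 86 - (j : Int))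
  else (114 - (j : Int), 2)

def posN (k : Nat) : Int × Int := posJ ((k + 14) % 112)

theorem rotate_posJ : ∀ j < 112, rotate_point_square (posJ j) = posJ ((j + 1) % 112) := by decide

theorem posN_succ (k : Nat) : posN (k + 1) = rotate_point_square (posN k) := by
  unfold posN
  rw [rotate_posJ ((k + 14) % 112) (Nat.mod_lt _ (by omega))]
  congr 1
  omega

theorem pv_pos_natCast (k : Nat) : pv_pos (k : Int) = posN k := by
  have hmod : PySem.Int.mod ((k : Int) + 14) 112 = (((k + 14) % 112 : Nat) : Int) := by
    rw [PySem.Int.mod_eq_emod_of_pos (by omega : (0:Int) < 112)]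
    push_cast; omega
  simp only [pv_pos, posN, posJ, hmod]
  set m := (k + 14) % 112 with hm
  split_ifs <;> first | rfl | (exfalso; omega)

-- the fold in A, as a standalone function for the invariant lemma
def foldA (l : List Int)
    (st : (Int × Int) × (Int × Int) × List ((Int × Int) × (Int × Int))) :
    (Int × Int) × (Int × Int) × List ((Int × Int) × (Int × Int)) :=
  l.foldl
    (fun st _ =>
      (rotate_point_square st.1, rotate_point_square st.2.1,
        st.2.2 ++ [(rotate_point_square st.1, rotate_point_square st.2.1)])) st

theorem foldA_inv : ∀ (l : List Int) (a b : Nat) (acc : List ((Int × Int) × (Int × Int))),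
    foldA l (posN a, posN b, acc) =
      (posN (a + l.length), posN (b + l.length),
        acc ++ (List.range l.length).map (fun i => (posN (a + i + 1), posN (b + i + 1)))) := by
  intro l
  induction l with
  | nil => intro a b acc; simp [foldA]
  | cons x xs ih =>
    intro a b acc
    have h1 : rotate_point_square (posN a) = posN (a + 1) := (posN_succ a).symm
    have h2 : rotate_point_square (posN b) = posN (b + 1) := (posN_succ b).symm
    simp only [foldA, List.foldl_cons, h1, h2]
    have key := ih (a + 1) (b + 1) (acc ++ [(posN (a + 1), posN (b + 1))])
    simp only [foldA] at key
    rw [key]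
    simp only [List.length_cons, List.range_succ_eq_map, List.map_cons, List.map_map,
      List.append_assoc, List.singleton_append, Prod.mk.injEq]
    refine ⟨by congr 1; omega, by congr 1; omega, ?_⟩
    rw [List.append_cancel_left_eq]
    refine List.cons_eq_cons.mpr ⟨?_, ?_⟩
    · rfl
    apply List.map_congr_left
    intro i _
    simp only [Function.comp, Prod.mk.injEq]
    exact ⟨by congr 1; omega, by congr 1; omega⟩

theorem get_datapoints_eq (n : Int) :
    get_datapoints n =
      (List.range ((n - 1).toNat + 1)).map (fun k => (posN k, posN (k + 56))) := by
  have h0 : posN 0 = ((2 : Int), (16 : Int)) := by decide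
  have h56 : posN 56 = ((30 : Int), (16 : Int)) := by decide
  show (foldA (PySem.List.pyRange 0 (n - 1) 1) ((2,16), (30,16), [((2,16),(30,16))])).2.2 = _
  rw [← h0, ← h56, foldA_inv]
  simp only [PySem.List.length_pyRange_one, List.range_succ_eq_map, List.map_cons,
    List.map_map, List.singleton_append]
  rw [show n - 1 - 0 = n - 1 from by ring]
  refine List.cons_eq_cons.mpr ⟨by norm_num, ?_⟩
  apply List.map_congr_left
  intro i _
  simp only [Function.comp, Prod.mk.injEq]
  exact ⟨by congr 1; omega, by congr 1; omega⟩

theorem get_datapoints_alt_eq (n : Int) :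
    get_datapoints_alt n =
      (List.range (max 1 n).toNat).map (fun k => (posN k, posN (k + 56))) := by
  unfold get_datapoints_alt
  rw [PySem.List.pyRange_one, show max 1 n - 0 = max 1 n from by ring]
  rw [List.map_map]
  apply List.map_congr_left
  intro k _
  simp only [Function.comp, zero_add]
  rw [pv_pos_natCast]
  rw [show ((k : Int) + 56) = ((k + 56 : Nat) : Int) from by push_cast; ring, pv_pos_natCast]

-- ===== VERDICT (by name: the statement is the Claim_ definition above) =====
theorem get_datapoints_spec : Claim_equal_get_datapoints := by
  intro n _
  show get_datapoints n = get_datapoints_alt n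
  rw [get_datapoints_eq, get_datapoints_alt_eq,
    show ((n - 1).toNat + 1) = (max 1 n).toNat from by omega]
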